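-- pv_equiv track=rewrite | github.com/ayoubzulfiqar/Leetcode-Medium | ArrangeTablebyGender/arrange_table_by_gender.py | arrange_by_gender
-- ===== SOURCE A (Python) =====
-- def arrange_by_gender(people_list):
--     males = []
--     females = []
--     other_genders = []
--
--     for person in people_list:
--         gender = person.get('gender')
--         if isinstance(gender, str):
--             gender_lower = gender.lower()
--             if gender_lower == 'male':
--                 males.append(person)
--             elif gender_lower == 'female':
--                 females.append(person)
--             else:
--                 other_genders.append(person)
--         else:
--             other_genders.append(person)
--
--     return males + females + other_genders
-- ===== SOURCE B (Python) =====
-- def arrange_by_gender(people_list):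
--     def rank(person):
--         gender = person.get('gender')
--         if isinstance(gender, str):
--             gender_lower = gender.lower()
--             if gender_lower == 'male':
--                 return 0
--             if gender_lower == 'female':
--                 return 1
--         return 2
--     return sorted(people_list, key=rank)
-- ===== Notes on version B (the rewrite author's own statement) =====
-- stated objective: idiomatic
-- what changed: Replaces the three explicit bucket lists with a single stable sort by a 3-valued rank key (male=0, female=1, other=2); sort stability preserves the within-group order of A's buckets.
import Mathlib
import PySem

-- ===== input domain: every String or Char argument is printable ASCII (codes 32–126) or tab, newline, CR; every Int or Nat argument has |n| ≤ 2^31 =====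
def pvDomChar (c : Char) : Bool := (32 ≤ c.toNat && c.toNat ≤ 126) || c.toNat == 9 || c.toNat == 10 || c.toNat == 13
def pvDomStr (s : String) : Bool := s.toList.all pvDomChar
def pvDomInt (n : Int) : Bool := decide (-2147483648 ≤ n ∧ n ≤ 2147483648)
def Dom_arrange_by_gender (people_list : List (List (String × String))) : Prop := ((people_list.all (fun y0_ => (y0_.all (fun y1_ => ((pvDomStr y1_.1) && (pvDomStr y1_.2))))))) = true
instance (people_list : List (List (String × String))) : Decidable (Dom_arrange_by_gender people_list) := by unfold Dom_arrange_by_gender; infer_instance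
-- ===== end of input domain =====

-- B replaces A's three explicit bucket lists with one stable sort by a 3-valued rank key (idiomatic; same return value).


-- ===== PORT A =====
-- A's loop body: append `person` to the males / females / other_genders bucket.
-- `person.get('gender')` is PySem.Dict.get?; a missing key (None) takes the non-str branch.
def agStep (acc : List (List (String × String)) × List (List (String × String)) × List (List (String × String)))
    (person : List (String × String)) :
    List (List (String × String)) × List (List (String × String)) × List (List (String × String)) :=
  let males := acc.1
  let females := acc.2.1
  let other_genders := acc.2.2
  match (PySem.Dict.mk person).get? "gender" with
  | some gender =>
    let gender_lower := PySem.Str.lower gender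
    if gender_lower = "male" then (males ++ [person], females, other_genders)
    else if gender_lower = "female" then (males, females ++ [person], other_genders)
    else (males, females, other_genders ++ [person])
  | none => (males, females, other_genders ++ [person])

def arrange_by_gender (people_list : List (List (String × String))) : List (List (String × String)) :=
  let acc := people_list.foldl agStep ([], [], [])
  acc.1 ++ acc.2.1 ++ acc.2.2

-- ===== PORT B =====
-- Source B's rank key: 0 for 'male', 1 for 'female', 2 otherwise (including a missing key).
def pvRank (person : List (String × String)) : Nat :=
  match (PySem.Dict.mk person).get? "gender" with
  | some gender =>
    let gender_lower := PySem.Str.lower gender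
    if gender_lower = "male" then 0
    else if gender_lower = "female" then 1
    else 2
  | none => 2

def arrange_by_gender_alt (people_list : List (List (String × String))) : List (List (String × String)) :=
  PySem.List.sorted people_list pvRank false

-- ===== PRECONDITION & SPEC =====
def Spec_arrange_by_gender (people_list : List (List (String × String))) (out : List (List (String × String))) : Prop := out = arrange_by_gender_alt people_list
instance (people_list : List (List (String × String))) (out : List (List (String × String))) : Decidable (Spec_arrange_by_gender people_list out) := by unfold Spec_arrange_by_gender; infer_instance

-- ===== CLAIM (what is proved, stated in full; the proofs are below) =====
def Claim_equal_arrange_by_gender : Prop := ∀ (people_list : List (List (String × String))), Dom_arrange_by_gender people_list → Spec_arrange_by_gender people_list (arrange_by_gender people_list)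

-- ===== LEMMAS AND PROOFS =====

-- A's loop keeps the three buckets equal to the three rank-filters of the processed prefix.
theorem agStep_foldl (xs : List (List (String × String)))
    (m f o : List (List (String × String))) :
    xs.foldl agStep (m, f, o) =
      (m ++ xs.filter (fun p => pvRank p == 0),
       f ++ xs.filter (fun p => pvRank p == 1),
       o ++ xs.filter (fun p => pvRank p == 2)) := by
  induction xs generalizing m f o with
  | nil => simp
  | cons x t ih =>
    simp only [List.foldl_cons, List.filter_cons]
    cases h : (PySem.Dict.mk x).get? "gender" with
    | none =>
      rw [show agStep (m, f, o) x = (m, f, o ++ [x]) from by simp [agStep, h]]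
      rw [ih]
      simp [pvRank, h]
    | some g =>
      by_cases h1 : PySem.Str.lower g = "male"
      · rw [show agStep (m, f, o) x = (m ++ [x], f, o) from by simp [agStep, h, h1]]
        rw [ih]
        simp [pvRank, h, h1]
      · by_cases h2 : PySem.Str.lower g = "female"
        · rw [show agStep (m, f, o) x = (m, f ++ [x], o) from by simp [agStep, h, h2]]
          rw [ih]
          simp [pvRank, h, h2]
        · rw [show agStep (m, f, o) x = (m, f, o ++ [x]) from by simp [agStep, h, h1, h2]]
          rw [ih]
          simp [pvRank, h, h1, h2]

-- insertBy places x after every element it does not go before, and before all the rest.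
theorem insertBy_split {α : Type} (before : α → α → Bool) (x : α) (u v : List α)
    (hu : ∀ y ∈ u, before x y = false) (hv : ∀ y ∈ v, before x y = true) :
    PySem.List.insertBy before x (u ++ v) = u ++ x :: v := by
  induction u with
  | nil =>
    cases v with
    | nil => simp [PySem.List.insertBy]
    | cons z zs => simp [PySem.List.insertBy, hv z (by simp)]
  | cons a u' ih =>
    have ha : before x a = false := hu a (by simp)
    simp [PySem.List.insertBy, ha, ih (fun y hy => hu y (by simp [hy]))]

-- Stable sort by the 3-valued rank is the concatenation of the three rank-filters.
theorem sorted_rank_eq_filters (xs : List (List (String × String))) :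
    PySem.List.sorted xs pvRank false =
      xs.filter (fun p => pvRank p == 0) ++ xs.filter (fun p => pvRank p == 1) ++
        xs.filter (fun p => pvRank p == 2) := by
  induction xs using List.reverseRecOn with
  | nil => simp [PySem.List.sorted_eq_foldl_insertBy]
  | append_singleton t x ih =>
    rw [PySem.List.sorted_eq_foldl_insertBy] at ih ⊢
    rw [List.foldl_append, List.foldl_cons, List.foldl_nil, ih]
    have hrank : pvRank x = 0 ∨ pvRank x = 1 ∨ pvRank x = 2 := by
      unfold pvRank
      cases (PySem.Dict.mk x).get? "gender" with
      | none => simp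
      | some g =>
        by_cases h1 : PySem.Str.lower g = "male" <;>
          by_cases h2 : PySem.Str.lower g = "female" <;> simp [h1, h2]
    have mem0 : ∀ y ∈ t.filter (fun p => pvRank p == 0), pvRank y = 0 := by
      intro y hy; simpa using (List.mem_filter.mp hy).2
    have mem1 : ∀ y ∈ t.filter (fun p => pvRank p == 1), pvRank y = 1 := by
      intro y hy; simpa using (List.mem_filter.mp hy).2
    have mem2 : ∀ y ∈ t.filter (fun p => pvRank p == 2), pvRank y = 2 := by
      intro y hy; simpa using (List.mem_filter.mp hy).2
    rcases hrank with h | h | h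
    · rw [List.append_assoc,
        insertBy_split _ x (t.filter (fun p => pvRank p == 0))
          ((t.filter (fun p => pvRank p == 1)) ++ (t.filter (fun p => pvRank p == 2)))
          (by intro y hy; simp [h, mem0 y hy])
          (by intro y hy
              rcases List.mem_append.mp hy with hy' | hy'
              · simp [h, mem1 y hy']
              · simp [h, mem2 y hy'])]
      simp [List.filter_append, h]
    · rw [
        insertBy_split _ x ((t.filter (fun p => pvRank p == 0)) ++ (t.filter (fun p => pvRank p == 1)))
          (t.filter (fun p => pvRank p == 2))
          (by intro y hy
              rcases List.mem_append.mp hy with hy' | hy'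
              · simp [h, mem0 y hy']
              · simp [h, mem1 y hy'])
          (by intro y hy; simp [h, mem2 y hy])]
      simp [List.filter_append, h]
    · rw [show (t.filter (fun p => pvRank p == 0) ++ t.filter (fun p => pvRank p == 1) ++
            t.filter (fun p => pvRank p == 2)) =
          ((t.filter (fun p => pvRank p == 0) ++ t.filter (fun p => pvRank p == 1) ++
            t.filter (fun p => pvRank p == 2)) ++ []) from by simp,
        insertBy_split _ x _ []
          (by intro y hy
              rcases List.mem_append.mp hy with hy' | hy'
              · rcases List.mem_append.mp hy' with hy'' | hy''
                · simp [h, mem0 y hy'']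
                · simp [h, mem1 y hy'']
              · simp [h, mem2 y hy'])
          (by intro y hy; simp at hy)]
      simp [List.filter_append, h]

-- ===== VERDICT (by name: the statement is the Claim_ definition above) =====
theorem arrange_by_gender_spec : Claim_equal_arrange_by_gender := by
  intro people_list _
  unfold Spec_arrange_by_gender arrange_by_gender arrange_by_gender_alt
  rw [agStep_foldl, sorted_rank_eq_filters]
  simp
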